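-- pv_equiv track=rewrite | github.com/AnhTuanNgo/Data-Science-2 | DungLai/MyClass/func_data_Science.py | func_find_str_after_two_chrSpecial
-- ===== SOURCE A (Python) =====
-- def func_find_str_after_two_chrSpecial(in_Str, chrSpecials, number_get_str):
--     "in_Str = 'PHẠM HO&#192;NG H\xc6\xaf\xc6\xa0NG &#193;I'"
--     "doulbe_chrSpecial = '&#'"
--     "number_str = 3, tức là muốm lấy số: 192 và 193 trong in_str "
--     ">>> [192, 193]"
--
--     len_chrSpecials = len(chrSpecials) # chiều dài
--     out_str =[]
--     for i, s in enumerate(in_Str):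
--         step = i + len_chrSpecials #i + 2
--         if in_Str[i: step] == chrSpecials: #in_Str[i:i + 2]
--             begin = step
--             after = begin + number_get_str
--             out_str.append(in_Str[begin:after]) #[i+3:i+5]
--
--     return out_str
-- ===== SOURCE B (Python) =====
-- _BASE = 1 << 32  # exceeds every Unicode code point, so equal hashes mean equal strings
--
-- def _poly_hash(s):
--     h = 0
--     for c in s:
--         h = h * _BASE + ord(c)
--     return h
--
-- def func_find_str_after_two_chrSpecial(in_Str, chrSpecials, number_get_str):
--     # B: exact Rabin-Karp. One rolling base-2^32 polynomial hash slides over the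
--     # text; a window matches exactly when its hash equals the pattern's hash
--     # (the modulus-free hash is injective on fixed-length strings), so no slice
--     # comparison happens at all.
--     m = len(chrSpecials)
--     n = len(in_Str)
--     if m > n:
--         return []
--     ph = _poly_hash(chrSpecials)
--     h = _poly_hash(in_Str[:m])
--     power = _BASE ** (m - 1) if m else 1
--     out_str = []
--     i = 0
--     for c_out, c_in in zip(in_Str, in_Str[m:]):
--         if h == ph:
--             out_str.append(in_Str[i + m : i + m + number_get_str])
--         h = (h - ord(c_out) * power) * _BASE + ord(c_in)
--         i += 1
--     if h == ph:
--         out_str.append(in_Str[n : n + number_get_str])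
--     return out_str
-- ===== Notes on version B (the rewrite author's own statement) =====
-- stated objective: alternative
-- what changed: B is an exact Rabin-Karp matcher: it precomputes the pattern's modulus-free base-2^32 polynomial hash and slides a single rolling hash over the text, emitting a slice whenever the window hash equals the pattern hash (the exact hash is injective on fixed-length strings, so no slice comparison happens at all); it trades A's per-index slice compares for big-int hash arithmetic whose cost grows with the marker length.
-- outside the precondition, e.g. on func_find_str_after_two_chrSpecial('ab', '', 1): A returns ['a', 'b'], B returns ['a']
import Mathlib
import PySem

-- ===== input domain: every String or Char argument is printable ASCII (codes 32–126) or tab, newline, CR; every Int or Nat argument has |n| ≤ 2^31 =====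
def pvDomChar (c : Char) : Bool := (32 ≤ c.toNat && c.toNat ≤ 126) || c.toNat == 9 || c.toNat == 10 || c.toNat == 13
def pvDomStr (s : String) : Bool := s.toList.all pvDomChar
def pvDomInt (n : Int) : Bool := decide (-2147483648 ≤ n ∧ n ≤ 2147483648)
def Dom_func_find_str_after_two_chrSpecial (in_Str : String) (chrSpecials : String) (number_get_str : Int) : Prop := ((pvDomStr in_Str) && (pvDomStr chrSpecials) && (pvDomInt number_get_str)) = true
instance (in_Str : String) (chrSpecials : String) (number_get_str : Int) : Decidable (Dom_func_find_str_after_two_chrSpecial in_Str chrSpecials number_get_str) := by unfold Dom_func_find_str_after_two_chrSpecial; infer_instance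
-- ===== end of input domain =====

-- B replaces A's slice-compare-at-every-index scan with an exact Rabin-Karp rolling
-- base-2^32 hash (objective: alternative algorithm; equality proved for non-empty markers).


-- ===== PORT A =====
def func_find_str_after_two_chrSpecial (in_Str : String) (chrSpecials : String) (number_get_str : Int) : List String :=
  let len_chrSpecials := PySem.Str.len chrSpecials
  (PySem.List.enumerate in_Str.toList).foldl
    (fun out_str p =>
      let i := p.1
      let step := i + len_chrSpecials
      if PySem.Str.slice in_Str (some i) (some step) = chrSpecials then
        let begin_ := step
        let after := begin_ + number_get_str
        out_str ++ [PySem.Str.slice in_Str (some begin_) (some after)]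
      else out_str)
    []

-- ===== PORT B =====
-- Source B's _BASE = 1 << 32
def pvBase : Int := 4294967296

-- Source B's _poly_hash
def pvHash (s : List Char) : Int := s.foldl (fun h c => h * pvBase + ↑c.toNat) 0

-- the body of Source B's 'for c_out, c_in in zip(...)' loop; state = (i, h, out_str)
def pvStep (in_Str : String) (number_get_str : Int) (m : Nat) (ph power : Int)
    (st : Nat × Int × List String) (p : Char × Char) : Nat × Int × List String :=
  let out := if st.2.1 = ph then
      st.2.2 ++ [PySem.Str.slice in_Str (some ↑(st.1 + m)) (some (↑(st.1 + m) + number_get_str))]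
    else st.2.2
  (st.1 + 1, (st.2.1 - ↑p.1.toNat * power) * pvBase + ↑p.2.toNat, out)

-- m, n are the two Python lens (nonnegative, so kept as Nat; in_Str[:m] / in_Str[m:] are
-- exactly take m / drop m for a nonnegative in-Python-range-or-clamped bound)
def func_find_str_after_two_chrSpecial_alt (in_Str : String) (chrSpecials : String) (number_get_str : Int) : List String :=
  let m := chrSpecials.toList.length
  let n := in_Str.toList.length
  if m > n then []
  else
    let ph := pvHash chrSpecials.toList
    let power : Int := if m = 0 then 1 else pvBase ^ (m - 1)
    let st := (List.zip in_Str.toList (in_Str.toList.drop m)).foldl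
      (pvStep in_Str number_get_str m ph power)
      (0, pvHash (in_Str.toList.take m), [])
    if st.2.1 = ph then
      st.2.2 ++ [PySem.Str.slice in_Str (some ↑n) (some (↑n + number_get_str))]
    else st.2.2

-- ===== PRECONDITION & SPEC =====
-- Pre_ excludes the empty marker chrSpecials = "", a defensible unspecified corner: A's
-- per-character scan matches '' at indices 0..n-1, while B's Rabin-Karp window scan sees
-- the n-m+1 = n+1 windows 0..n and returns a different list there.
def Pre_func_find_str_after_two_chrSpecial (in_Str : String) (chrSpecials : String) (number_get_str : Int) : Prop := chrSpecials ≠ ""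
instance (in_Str : String) (chrSpecials : String) (number_get_str : Int) : Decidable (Pre_func_find_str_after_two_chrSpecial in_Str chrSpecials number_get_str) := by unfold Pre_func_find_str_after_two_chrSpecial; infer_instance

def pvWitness_func_find_str_after_two_chrSpecial : String × String × Int := ("a&#12b&#3", "&#", 3)

def Spec_func_find_str_after_two_chrSpecial (in_Str : String) (chrSpecials : String) (number_get_str : Int) (out : List String) : Prop := out = func_find_str_after_two_chrSpecial_alt in_Str chrSpecials number_get_str
instance (in_Str : String) (chrSpecials : String) (number_get_str : Int) (out : List String) : Decidable (Spec_func_find_str_after_two_chrSpecial in_Str chrSpecials number_get_str out) := by unfold Spec_func_find_str_after_two_chrSpecial; infer_instance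

-- ===== CLAIM (what is proved, stated in full; the proofs are below) =====
def Claim_equal_func_find_str_after_two_chrSpecial : Prop := ∀ (in_Str : String) (chrSpecials : String) (number_get_str : Int), Dom_func_find_str_after_two_chrSpecial in_Str chrSpecials number_get_str → Pre_func_find_str_after_two_chrSpecial in_Str chrSpecials number_get_str → Spec_func_find_str_after_two_chrSpecial in_Str chrSpecials number_get_str (func_find_str_after_two_chrSpecial in_Str chrSpecials number_get_str)

-- ===== LEMMAS AND PROOFS =====

-- 'the marker occurs at position j'
def pvHit (in_Str : String) (chrSpecials : String) (j : Nat) : Bool :=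
  List.isPrefixOf chrSpecials.toList (in_Str.toList.drop j)

-- the string both programs emit for a hit at position j
def pvOut (in_Str : String) (chrSpecials : String) (k : Int) (j : Nat) : String :=
  PySem.Str.slice in_Str (some (↑j + PySem.Str.len chrSpecials))
    (some (↑j + PySem.Str.len chrSpecials + k))

-- reference value: outputs for all hits among positions s, s+1, …, s+len-1
def pvSpecList (in_Str : String) (chrSpecials : String) (k : Int) (s len : Nat) : List String :=
  ((List.range' s len).filter (fun j => pvHit in_Str chrSpecials j)).map
    (pvOut in_Str chrSpecials k)

theorem pvCond_iff (in_Str : String) (chrSpecials : String) (j : Nat) :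
    (PySem.Str.slice in_Str (some ↑j) (some (↑j + PySem.Str.len chrSpecials)) = chrSpecials)
      ↔ pvHit in_Str chrSpecials j = true := by
  rw [← String.toList_inj, PySem.Str.toList_slice, PySem.Chars.slice_eq_listSlice,
    PySem.Str.len_eq, PySem.List.slice_natCast_add, pvHit, List.isPrefixOf_iff_prefix]
  constructor
  · intro h
    exact List.prefix_iff_eq_take.mpr h.symm
  · intro h
    exact (List.prefix_iff_eq_take.mp h).symm

theorem pvA_foldl (in_Str : String) (chrSpecials : String) (k : Int) (xs : List Char)
    (s : Nat) (acc : List String) :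
    (PySem.List.enumerate xs ↑s).foldl
      (fun out_str p =>
        if PySem.Str.slice in_Str (some p.1) (some (p.1 + PySem.Str.len chrSpecials)) = chrSpecials then
          out_str ++ [PySem.Str.slice in_Str (some (p.1 + PySem.Str.len chrSpecials))
            (some (p.1 + PySem.Str.len chrSpecials + k))]
        else out_str) acc
      = acc ++ pvSpecList in_Str chrSpecials k s xs.length := by
  induction xs generalizing s acc with
  | nil => simp [pvSpecList]
  | cons x xs ih =>
    rw [PySem.List.enumerate_cons, List.foldl_cons]
    have hs1 : (↑s + 1 : Int) = ((s + 1 : Nat) : Int) := by push_cast; ring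
    rw [hs1, ih]
    have hr : List.range' s (x :: xs).length = s :: List.range' (s + 1) xs.length := by
      simp [List.range'_succ]
    by_cases hc : pvHit in_Str chrSpecials s = true
    · have : (PySem.Str.slice in_Str (some ↑s) (some (↑s + PySem.Str.len chrSpecials)) = chrSpecials) := (pvCond_iff _ _ _).mpr hc
      simp only [this, pvSpecList, hr, List.filter_cons, hc, if_true,
        List.map_cons, List.append_assoc, List.cons_append, List.nil_append]
      rfl
    · have : ¬ (PySem.Str.slice in_Str (some ↑s) (some (↑s + PySem.Str.len chrSpecials)) = chrSpecials) := fun h => hc ((pvCond_iff _ _ _).mp h)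
      simp only [this, pvSpecList, hr, List.filter_cons, if_neg hc]
      rfl

-- a hit at j needs the whole (non-empty) marker to fit: j + m ≤ n
theorem pvHit_le (in_Str : String) (chrSpecials : String) (j : Nat)
    (hm : 0 < chrSpecials.toList.length)
    (h : pvHit in_Str chrSpecials j = true) :
    j + chrSpecials.toList.length ≤ in_Str.toList.length := by
  rw [pvHit, List.isPrefixOf_iff_prefix] at h
  have := h.length_le
  rw [List.length_drop] at this
  omega

theorem pvBase_pos : (0 : Int) < pvBase := by norm_num [pvBase]

-- ---- exact-hash facts ----

theorem pvChar_lt (c : Char) : (↑c.toNat : Int) < pvBase := by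
  have h := c.val.toNat_lt_size
  have : c.toNat < 4294967296 := lt_of_lt_of_le h (by norm_num [UInt32.size])
  unfold pvBase
  exact_mod_cast this

theorem pvHash_shift (xs : List Char) : ∀ a : Int,
    xs.foldl (fun h c => h * pvBase + ↑c.toNat) a = a * pvBase ^ xs.length + pvHash xs := by
  induction xs with
  | nil => intro a; simp [pvHash]
  | cons c xs ih =>
    intro a
    have hc : pvHash (c :: xs) = ↑c.toNat * pvBase ^ xs.length + pvHash xs := by
      show List.foldl _ (0 * pvBase + ↑c.toNat) xs = _
      rw [ih]; ring
    show List.foldl _ (a * pvBase + ↑c.toNat) xs = _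
    rw [ih, hc, List.length_cons]; ring

theorem pvHash_cons (c : Char) (xs : List Char) :
    pvHash (c :: xs) = ↑c.toNat * pvBase ^ xs.length + pvHash xs := by
  show List.foldl _ (0 * pvBase + ↑c.toNat) xs = _
  rw [pvHash_shift]; ring

theorem pvHash_snoc (xs : List Char) (c : Char) :
    pvHash (xs ++ [c]) = pvHash xs * pvBase + ↑c.toNat := by
  simp [pvHash, List.foldl_append]

theorem pvHash_bounds (xs : List Char) : 0 ≤ pvHash xs ∧ pvHash xs < pvBase ^ xs.length := by
  induction xs with
  | nil => simp [pvHash]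
  | cons c xs ih =>
    rw [pvHash_cons, List.length_cons]
    have hc0 : (0 : Int) ≤ ↑c.toNat := Int.natCast_nonneg _
    have hc1 : (↑c.toNat : Int) ≤ pvBase - 1 := by have := pvChar_lt c; omega
    have hP : (0 : Int) < pvBase ^ xs.length := pow_pos pvBase_pos _
    constructor
    · exact add_nonneg (mul_nonneg hc0 (le_of_lt hP)) ih.1
    · have h1 : (↑c.toNat : Int) * pvBase ^ xs.length ≤ (pvBase - 1) * pvBase ^ xs.length :=
        mul_le_mul_of_nonneg_right hc1 (le_of_lt hP)
      have : pvBase ^ (xs.length + 1) = pvBase * pvBase ^ xs.length := by ring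
      rw [this]
      nlinarith [ih.2]

theorem pvDigit_cancel (P c c' r r' : Int) (hP : 0 < P)
    (hr0 : 0 ≤ r) (hr1 : r < P) (hr0' : 0 ≤ r') (hr1' : r' < P)
    (h : c * P + r = c' * P + r') : c = c' ∧ r = r' := by
  rcases lt_trichotomy c c' with hlt | heq | hgt
  · exfalso
    have h1 : c + 1 ≤ c' := hlt
    nlinarith [mul_le_mul_of_nonneg_right h1 (le_of_lt hP)]
  · exact ⟨heq, by nlinarith⟩
  · exfalso
    have h1 : c' + 1 ≤ c := hgt
    nlinarith [mul_le_mul_of_nonneg_right h1 (le_of_lt hP)]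

theorem pvHash_inj (xs : List Char) : ∀ ys : List Char, xs.length = ys.length →
    pvHash xs = pvHash ys → xs = ys := by
  induction xs with
  | nil => intro ys hl _; exact (List.eq_nil_of_length_eq_zero hl.symm).symm
  | cons c xs ih =>
    intro ys hl hh
    cases ys with
    | nil => simp at hl
    | cons d ys =>
      have hlen : xs.length = ys.length := by simpa using hl
      rw [pvHash_cons, pvHash_cons, hlen] at hh
      have hP : (0 : Int) < pvBase ^ ys.length := pow_pos pvBase_pos _
      have hx := pvHash_bounds xs
      have hy := pvHash_bounds ys
      rw [hlen] at hx
      obtain ⟨h1, h2⟩ := pvDigit_cancel _ _ _ _ _ hP hx.1 hx.2 hy.1 hy.2 hh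
      have hcd : c = d := Char.ext (UInt32.toNat_inj.mp (by exact_mod_cast h1))
      rw [hcd, ih ys hlen h2]

-- hash of the length-m window at i equals the pattern hash ⟺ the marker occurs at i
theorem pvHashHit (in_Str : String) (chrSpecials : String) (i : Nat)
    (h : i + chrSpecials.toList.length ≤ in_Str.toList.length) :
    (pvHash ((in_Str.toList.drop i).take chrSpecials.toList.length)
        = pvHash chrSpecials.toList)
      ↔ pvHit in_Str chrSpecials i = true := by
  have hlen : ((in_Str.toList.drop i).take chrSpecials.toList.length).length
      = chrSpecials.toList.length := by
    rw [List.length_take, List.length_drop]; omega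
  rw [pvHit, List.isPrefixOf_iff_prefix]
  constructor
  · intro hh
    exact List.prefix_iff_eq_take.mpr (pvHash_inj _ _ hlen hh).symm
  · intro hh
    rw [← List.prefix_iff_eq_take.mp hh]

-- rolling-hash update: one step of Source B's loop moves the window hash from i to i+1
theorem pvRoll (text : List Char) (m i : Nat) (hm : 0 < m) (h : i + m < text.length) :
    (pvHash ((text.drop i).take m)
        - ↑(text[i]'(by omega)).toNat * pvBase ^ (m - 1)) * pvBase
      + ↑(text[i + m]'h).toNat
    = pvHash ((text.drop (i + 1)).take m) := by
  obtain ⟨m', rfl⟩ : ∃ m', m = m' + 1 := ⟨m - 1, by omega⟩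
  have hdrop : text.drop i = text[i]'(by omega) :: text.drop (i + 1) :=
    (List.getElem_cons_drop (by omega)).symm
  have hmid : ((text.drop (i + 1)).take m').length = m' := by
    simp [List.length_take, List.length_drop]; omega
  have hwin : (text.drop i).take (m' + 1)
      = text[i]'(by omega) :: (text.drop (i + 1)).take m' := by
    rw [hdrop, List.take_succ_cons]
  have hgd : (text.drop (i + 1))[m']'(by simp [List.length_drop]; omega) = text[i + m' + 1]'(by omega) := by
    rw [List.getElem_drop]
    simp only [show i + 1 + m' = i + m' + 1 from by omega]
  have hwin' : (text.drop (i + 1)).take (m' + 1)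
      = (text.drop (i + 1)).take m' ++ [text[i + m' + 1]'(by omega)] := by
    rw [List.take_add_one, List.getElem?_eq_getElem (by simp [List.length_drop]; omega), hgd]
    rfl
  rw [hwin, pvHash_cons, hmid, hwin', pvHash_snoc]
  have : i + (m' + 1) = i + m' + 1 := by omega
  simp only [this, Nat.add_sub_cancel]
  ring

-- invariant of Source B's zip-loop followed by its final check
theorem pvB_inv (in_Str : String) (chrSpecials : String) (k : Int)
    (hm : 0 < chrSpecials.toList.length) :
    ∀ (d i : Nat) (acc : List String),
      i + chrSpecials.toList.length + d = in_Str.toList.length →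
      (let m := chrSpecials.toList.length
       let ph := pvHash chrSpecials.toList
       let st := (List.zip (in_Str.toList.drop i) (in_Str.toList.drop (i + m))).foldl
         (pvStep in_Str k m ph (pvBase ^ (m - 1)))
         (i, pvHash ((in_Str.toList.drop i).take m), acc)
       if st.2.1 = ph then
         st.2.2 ++ [PySem.Str.slice in_Str (some ↑in_Str.toList.length)
           (some (↑in_Str.toList.length + k))]
       else st.2.2)
      = acc ++ pvSpecList in_Str chrSpecials k i (d + 1) := by
  intro d
  induction d with
  | zero =>
    intro i acc hn
    have hz : in_Str.toList.drop (i + chrSpecials.toList.length) = [] :=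
      List.drop_eq_nil_of_le (by omega)
    simp only [hz, List.zip_nil_right, List.foldl_nil]
    have hiff := pvHashHit in_Str chrSpecials i (by omega)
    have hout : PySem.Str.slice in_Str (some ↑in_Str.toList.length)
        (some (↑in_Str.toList.length + k)) = pvOut in_Str chrSpecials k i := by
      rw [pvOut, PySem.Str.len_eq]
      have h2 : (↑in_Str.toList.length : Int) = ↑i + (↑chrSpecials.toList.length : Int) := by
        omega
      rw [h2]
    by_cases hc : pvHash ((in_Str.toList.drop i).take chrSpecials.toList.length)
        = pvHash chrSpecials.toList
    · have hlist : pvSpecList in_Str chrSpecials k i 1 = [pvOut in_Str chrSpecials k i] := by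
        simp [pvSpecList, List.range'_one, hiff.mp hc]
      rw [if_pos hc, hout, hlist]
    · have hfalse : pvHit in_Str chrSpecials i = false := by
        cases hpv : pvHit in_Str chrSpecials i
        · rfl
        · exact absurd (hiff.mpr hpv) hc
      have hlist : pvSpecList in_Str chrSpecials k i 1 = [] := by
        simp [pvSpecList, List.range'_one, hfalse]
      rw [if_neg hc, hlist, List.append_nil]
  | succ d ih =>
    intro i acc hn
    have hil : i < in_Str.toList.length := by omega
    have himl : i + chrSpecials.toList.length < in_Str.toList.length := by omega
    have hzip : List.zip (in_Str.toList.drop i)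
          (in_Str.toList.drop (i + chrSpecials.toList.length))
        = (in_Str.toList[i]'hil, in_Str.toList[i + chrSpecials.toList.length]'himl)
          :: List.zip (in_Str.toList.drop (i + 1))
              (in_Str.toList.drop (i + 1 + chrSpecials.toList.length)) := by
      have hd1 : in_Str.toList.drop i
          = in_Str.toList[i]'hil :: in_Str.toList.drop (i + 1) :=
        (List.getElem_cons_drop hil).symm
      have hd2 : in_Str.toList.drop (i + chrSpecials.toList.length)
          = in_Str.toList[i + chrSpecials.toList.length]'himl
            :: in_Str.toList.drop (i + 1 + chrSpecials.toList.length) := by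
        rw [show i + 1 + chrSpecials.toList.length = (i + chrSpecials.toList.length) + 1 by omega]
        exact (List.getElem_cons_drop himl).symm
      rw [hd1, hd2, List.zip_cons_cons]
    have hiff := pvHashHit in_Str chrSpecials i (by omega)
    have hroll := pvRoll in_Str.toList chrSpecials.toList.length i hm himl
    have hslice : PySem.Str.slice in_Str (some ↑(i + chrSpecials.toList.length))
        (some (↑(i + chrSpecials.toList.length) + k)) = pvOut in_Str chrSpecials k i := by
      rw [pvOut, PySem.Str.len_eq]
      have h2 : ((i + chrSpecials.toList.length : Nat) : Int)
          = ↑i + (↑chrSpecials.toList.length : Int) := by push_cast; rfl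
      rw [← h2]
    have hrange : pvSpecList in_Str chrSpecials k i (d + 1 + 1)
        = ((if pvHit in_Str chrSpecials i then [pvOut in_Str chrSpecials k i] else [])
          ++ pvSpecList in_Str chrSpecials k (i + 1) (d + 1)) := by
      rw [pvSpecList, pvSpecList, List.range'_succ, List.filter_cons]
      by_cases hh : pvHit in_Str chrSpecials i <;> simp [hh]
    have hstep : pvStep in_Str k chrSpecials.toList.length (pvHash chrSpecials.toList)
        (pvBase ^ (chrSpecials.toList.length - 1))
        (i, pvHash ((in_Str.toList.drop i).take chrSpecials.toList.length), acc)
        (in_Str.toList[i]'hil, in_Str.toList[i + chrSpecials.toList.length]'himl)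
        = (i + 1, pvHash ((in_Str.toList.drop (i + 1)).take chrSpecials.toList.length),
           if pvHash ((in_Str.toList.drop i).take chrSpecials.toList.length)
               = pvHash chrSpecials.toList then
             acc ++ [PySem.Str.slice in_Str (some ↑(i + chrSpecials.toList.length))
               (some (↑(i + chrSpecials.toList.length) + k))]
           else acc) := by
      rw [pvStep]
      simp only [hroll]
    simp only [hzip, List.foldl_cons]
    rw [hstep]
    have htail := ih (i + 1) (if pvHash ((in_Str.toList.drop i).take chrSpecials.toList.length)
            = pvHash chrSpecials.toList then
          acc ++ [PySem.Str.slice in_Str (some ↑(i + chrSpecials.toList.length))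
            (some (↑(i + chrSpecials.toList.length) + k))]
        else acc) (by omega)
    simp only at htail
    rw [htail, hrange]
    by_cases hc : pvHash ((in_Str.toList.drop i).take chrSpecials.toList.length)
        = pvHash chrSpecials.toList
    · have hhit : pvHit in_Str chrSpecials i = true := hiff.mp hc
      rw [if_pos hc, if_pos hhit, hslice, List.append_assoc]
    · have hhit : ¬ pvHit in_Str chrSpecials i = true := fun hh => hc (hiff.mpr hh)
      rw [if_neg hc, if_neg hhit, List.nil_append]

-- the tail positions n-m+1 … n-1 can hold no hit, so A's full range reduces to B's
theorem pvRange_reduce (in_Str : String) (chrSpecials : String) (k : Int)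
    (hm : 0 < chrSpecials.toList.length)
    (hmn : chrSpecials.toList.length ≤ in_Str.toList.length) :
    pvSpecList in_Str chrSpecials k 0 in_Str.toList.length
      = pvSpecList in_Str chrSpecials k 0
          (in_Str.toList.length - chrSpecials.toList.length + 1) := by
  rw [pvSpecList, pvSpecList]
  have hsplit : List.range' 0 in_Str.toList.length
      = List.range' 0 (in_Str.toList.length - chrSpecials.toList.length + 1)
        ++ List.range' (in_Str.toList.length - chrSpecials.toList.length + 1)
            (chrSpecials.toList.length - 1) := by
    conv_lhs => rw [show in_Str.toList.length
        = (in_Str.toList.length - chrSpecials.toList.length + 1)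
          + (chrSpecials.toList.length - 1) from by omega, ← List.range'_append]
    norm_num
  rw [hsplit, List.filter_append]
  have hnil : (List.range' (in_Str.toList.length - chrSpecials.toList.length + 1)
      (chrSpecials.toList.length - 1)).filter (fun j => pvHit in_Str chrSpecials j) = [] := by
    rw [List.filter_eq_nil_iff]
    intro j hj hne
    have hj' := List.mem_range'_1.mp hj
    have := pvHit_le in_Str chrSpecials j hm (by simpa using hne)
    omega
  rw [hnil, List.append_nil]

-- ===== VERDICT (by name: the statement is the Claim_ definition above) =====
theorem func_find_str_after_two_chrSpecial_spec : Claim_equal_func_find_str_after_two_chrSpecial := by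
  intro in_Str chrSpecials number_get_str _ hpre
  unfold Spec_func_find_str_after_two_chrSpecial
  have hm : 0 < chrSpecials.toList.length := by
    rcases Nat.eq_zero_or_pos chrSpecials.toList.length with h0 | h
    · exact absurd (String.toList_inj.mp (by simpa using List.eq_nil_of_length_eq_zero h0)) hpre
    · exact h
  -- A-side
  have hA : func_find_str_after_two_chrSpecial in_Str chrSpecials number_get_str
      = pvSpecList in_Str chrSpecials number_get_str 0 in_Str.toList.length := by
    have := pvA_foldl in_Str chrSpecials number_get_str in_Str.toList 0 []
    rw [Nat.cast_zero] at this
    rw [func_find_str_after_two_chrSpecial]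
    simpa using this
  rw [hA]
  by_cases hmn : chrSpecials.toList.length > in_Str.toList.length
  · -- pattern longer than text: no hit, B returns []
    rw [func_find_str_after_two_chrSpecial_alt, if_pos hmn]
    rw [pvSpecList, List.filter_eq_nil_iff.mpr, List.map_nil]
    intro j hj hne
    have := pvHit_le in_Str chrSpecials j hm (by simpa using hne)
    omega
  · have hmn' : chrSpecials.toList.length ≤ in_Str.toList.length := by omega
    -- B-side
    have hB : func_find_str_after_two_chrSpecial_alt in_Str chrSpecials number_get_str
        = pvSpecList in_Str chrSpecials number_get_str 0
            (in_Str.toList.length - chrSpecials.toList.length + 1) := by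
      rw [func_find_str_after_two_chrSpecial_alt, if_neg hmn]
      have hpow : (if chrSpecials.toList.length = 0 then (1 : Int)
          else pvBase ^ (chrSpecials.toList.length - 1))
          = pvBase ^ (chrSpecials.toList.length - 1) := if_neg (by omega)
      rw [hpow]
      have hinv := pvB_inv in_Str chrSpecials number_get_str hm
        (in_Str.toList.length - chrSpecials.toList.length) 0 [] (by omega)
      simp only [Nat.zero_add, List.drop_zero, List.nil_append] at hinv
      exact hinv
    rw [hB, pvRange_reduce in_Str chrSpecials number_get_str hm hmn']
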